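-- pv_equiv track=rewrite | github.com/ibukiIWAMURA/master-ILM | chunk/Chunk_with_CV.py | preprocess_sequence
-- ===== SOURCE A (Python) =====
-- def preprocess_sequence(sequence):
--     if not sequence:
--         return sequence
--     # 最初の要素をリストに追加し、以降は連続する要素を除外
--     processed_sequence = [sequence[0]]
--     for i in range(1, len(sequence)):
--         if not (sequence[i] == '0' and sequence[i - 1] == '0'):
--             processed_sequence.append(sequence[i])
--     return processed_sequence
-- ===== SOURCE B (Python) =====
-- def preprocess_sequence(sequence):
--     if not sequence:
--         return sequence
--     out = []
--     i, n = 0, len(sequence)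
--     while i < n:
--         j = i
--         while j < n and sequence[j] == sequence[i]:
--             j += 1
--         if sequence[i] == '0':
--             out.append('0')
--         else:
--             out.extend(sequence[i:j])
--         i = j
--     return out
-- ===== Notes on version B (the rewrite author's own statement) =====
-- stated objective: alternative
-- what changed: B scans the sequence as maximal runs of consecutive equal elements and emits '0' once per run of zeros (other runs copied whole), replacing A's pairwise sequence[i]==sequence[i-1]=='0' adjacency test over indices.
import Mathlib
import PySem

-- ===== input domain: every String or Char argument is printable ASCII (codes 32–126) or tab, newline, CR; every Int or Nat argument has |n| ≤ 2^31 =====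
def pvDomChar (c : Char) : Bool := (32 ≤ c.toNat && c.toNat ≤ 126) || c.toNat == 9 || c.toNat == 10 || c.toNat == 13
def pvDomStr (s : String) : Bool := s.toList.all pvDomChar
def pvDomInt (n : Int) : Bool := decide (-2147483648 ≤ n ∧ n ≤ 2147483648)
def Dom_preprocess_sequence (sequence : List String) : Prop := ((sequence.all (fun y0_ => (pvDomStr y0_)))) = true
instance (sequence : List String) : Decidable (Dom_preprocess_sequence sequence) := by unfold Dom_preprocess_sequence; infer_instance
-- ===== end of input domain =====

-- B replaces A's pairwise adjacency test with a scan over maximal runs of equal elements (alternative decomposition, same cost).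

-- ===== PORT A =====
def preprocess_sequence (sequence : List String) : List String :=
  match sequence with
  | [] => sequence
  | x :: _ =>
    (PySem.List.pyRange 1 (sequence.length : Int) 1).foldl
      (fun acc i =>
        if ¬ (PySem.List.pyGetD sequence i "" = "0" ∧ PySem.List.pyGetD sequence (i - 1) "" = "0")
        then acc ++ [PySem.List.pyGetD sequence i ""] else acc)
      [x]

-- ===== PORT B =====
-- inner/outer while loops of Source B: find the end of the current run, emit it, continue on the rest
def pvRuns (out : List String) : List String → List String
  | [] => out
  | x :: xs =>
      pvRuns (out ++ (if x = "0" then ["0"] else x :: xs.takeWhile (fun y => y = x)))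
        (xs.dropWhile (fun y => y = x))
  termination_by l => l.length
  decreasing_by
    exact Nat.lt_succ_of_le (List.length_dropWhile_le _ _)

def preprocess_sequence_alt (sequence : List String) : List String :=
  match sequence with
  | [] => sequence
  | _ :: _ => pvRuns [] sequence

-- ===== PRECONDITION & SPEC =====
def Spec_preprocess_sequence (sequence : List String) (out : List String) : Prop := out = preprocess_sequence_alt sequence
instance (sequence : List String) (out : List String) : Decidable (Spec_preprocess_sequence sequence out) := by unfold Spec_preprocess_sequence; infer_instance

-- ===== CLAIM (what is proved, stated in full; the proofs are below) =====
def Claim_equal_preprocess_sequence : Prop := ∀ (sequence : List String), Dom_preprocess_sequence sequence → Spec_preprocess_sequence sequence (preprocess_sequence sequence)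

-- ===== LEMMAS AND PROOFS =====

-- canonical form both programs compute: collapse with the previous element as context
def pvCollapse : String → List String → List String
  | _, [] => []
  | p, y :: ys => (if y = "0" ∧ p = "0" then [] else [y]) ++ pvCollapse y ys

lemma pvCollapse_run (p : String) (t rest : List String) (ht : ∀ a ∈ t, a = p) :
    pvCollapse p (t ++ rest) = (if p = "0" then [] else t) ++ pvCollapse p rest := by
  induction t with
  | nil => simp
  | cons a t ih =>
    have ha : a = p := ht a (by simp)
    subst ha
    have hthis := ih (fun b hb => ht b (by simp [hb]))
    by_cases hp : a = "0"
    · subst hp; simp [pvCollapse] at hthis ⊢; simp [hthis]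
    · simp [pvCollapse, hp, hthis]

lemma dropWhile_head_false {p : String → Bool} {xs : List String} {z : String} {zs : List String}
    (h : xs.dropWhile p = z :: zs) : p z = false := by
  induction xs with
  | nil => simp at h
  | cons a xs ih =>
    rw [List.dropWhile_cons] at h
    by_cases hp : p a
    · rw [if_pos hp] at h; exact ih h
    · rw [if_neg hp] at h
      injection h with h1 _
      subst h1
      simpa using hp

lemma pvRuns_eq (y : String) (ys : List String) : ∀ out, pvRuns out (y :: ys) = out ++ y :: pvCollapse y ys := by
  induction hn : (y :: ys).length using Nat.strong_induction_on generalizing y ys with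
  | _ n ih =>
  intro out
  set t := ys.takeWhile (fun a => a = y) with hT
  set r := ys.dropWhile (fun a => a = y) with hR
  have hsplit : ys = t ++ r := (List.takeWhile_append_dropWhile).symm
  have hrun : ∀ a ∈ t, a = y := by
    intro a ha
    have := List.mem_takeWhile_imp (hT ▸ ha)
    simpa using this
  have hcol : pvCollapse y ys = (if y = "0" then [] else t) ++ pvCollapse y r := by
    rw [hsplit]; exact pvCollapse_run y t r hrun
  have hrlen : r.length ≤ ys.length := hR ▸ List.length_dropWhile_le _ _
  rw [pvRuns, ← hT, ← hR]
  cases hr : r with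
  | nil =>
    rw [pvRuns]
    rw [hr] at hcol
    by_cases hy : y = "0" <;> (simp [hy, pvCollapse] at hcol; simp [hy, hcol])
  | cons z zs =>
    have hz : z ≠ y := by
      have := dropWhile_head_false (p := fun a => decide (a = y)) (hR.symm.trans hr)
      simpa using this
    have hlen : (z :: zs).length < n := by
      rw [← hn]; simp only [List.length_cons]
      have : r.length = zs.length + 1 := by rw [hr]; simp
      omega
    rw [ih _ hlen z zs rfl]
    rw [hr] at hcol
    have hz0 : pvCollapse y (z :: zs) = z :: pvCollapse z zs := by
      by_cases hy : y = "0"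
      · have : z ≠ "0" := hy ▸ hz
        simp [pvCollapse, this]
      · simp [pvCollapse, hy]
    rw [hcol, hz0]
    by_cases hy : y = "0" <;> simp [hy]

lemma A_fold (s : List String) : ∀ (d j : Nat) (acc : List String), 1 ≤ j → j + d = s.length →
    (PySem.List.pyRange (j : Int) (s.length : Int) 1).foldl
      (fun acc i =>
        if ¬ (PySem.List.pyGetD s i "" = "0" ∧ PySem.List.pyGetD s (i - 1) "" = "0")
        then acc ++ [PySem.List.pyGetD s i ""] else acc)
      acc = acc ++ pvCollapse (s.getD (j - 1) "") (s.drop j) := by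
  intro d
  induction d with
  | zero =>
    intro j acc _ hlen
    have : (s.length : Int) ≤ (j : Int) := by omega
    rw [PySem.List.pyRange_one_eq_nil this]
    have : s.drop j = [] := by
      apply List.drop_eq_nil_of_le; omega
    simp [this, pvCollapse]
  | succ d ih =>
    intro j acc hj hlen
    have hjlt : j < s.length := by omega
    have hcons : PySem.List.pyRange (j : Int) (s.length : Int) 1
        = (j : Int) :: PySem.List.pyRange ((j : Int) + 1) (s.length : Int) 1 :=
      PySem.List.pyRange_one_cons (by exact_mod_cast hjlt)
    have hcast : ((j : Int) + 1) = ((j + 1 : Nat) : Int) := by push_cast; ring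
    rw [hcons, List.foldl_cons, hcast, ih (j + 1) _ (by omega) (by omega)]
    have hdrop : s.drop j = s[j] :: s.drop (j + 1) := List.drop_eq_getElem_cons hjlt
    have hgj : PySem.List.pyGetD s (j : Int) "" = s[j] := by
      rw [PySem.List.pyGetD_natCast]; exact List.getD_eq_getElem s "" hjlt
    have hgp : PySem.List.pyGetD s ((j : Int) - 1) "" = s.getD (j - 1) "" := by
      have : ((j : Int) - 1) = ((j - 1 : Nat) : Int) := by omega
      rw [this, PySem.List.pyGetD_natCast]
    have hgj' : s.getD ((j + 1) - 1) "" = s[j] := by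
      simpa using List.getD_eq_getElem s "" hjlt
    rw [hdrop, hgj, hgp, hgj']
    by_cases hc1 : s[j] = "0" <;> by_cases hc2 : s[j - 1]?.getD "" = "0" <;>
      simp [pvCollapse, List.getD, hc1, hc2]

-- ===== VERDICT (by name: the statement is the Claim_ definition above) =====
theorem preprocess_sequence_spec : Claim_equal_preprocess_sequence := by
  intro s _
  unfold Spec_preprocess_sequence
  cases s with
  | nil => rfl
  | cons x xs =>
    show preprocess_sequence (x :: xs) = preprocess_sequence_alt (x :: xs)
    unfold preprocess_sequence preprocess_sequence_alt
    rw [pvRuns_eq x xs []]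
    have := A_fold (x :: xs) xs.length 1 [x] (by omega) (by simp [Nat.add_comm])
    simpa [pvCollapse] using this
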